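-- pv_equiv track=rewrite | github.com/FriendlyOneDev/lancer-ledger | backend/app/services/resource_calc.py | compute_ll_from_ticks
-- ===== SOURCE A (Python) =====
-- def get_ll_clock_segments(license_level: int) -> int:
--     """Get the number of segments for an LL clock based on license level."""
--     if 1 <= license_level <= 5:
--         return 3
--     elif 6 <= license_level <= 9:
--         return 4
--     elif 10 <= license_level <= 12:
--         return 5
--     return 3  # Default
--
-- def compute_ll_from_ticks(total_ticks: int, starting_ll: int = 0) -> tuple[int, int]:
--     """
--     Given a total number of LL clock ticks, simulate clock progression
--     from starting_ll to compute the final (license_level, ll_clock_progress).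
--
--     Each level has a certain number of segments (determined by get_ll_clock_segments).
--     When the clock fills, the pilot levels up and the clock resets.
--     Max level is 12.
--     """
--     current_ll = starting_ll
--     remaining_ticks = total_ticks
--
--     while remaining_ticks > 0 and current_ll < 12:
--         segments = get_ll_clock_segments(current_ll)
--         if remaining_ticks >= segments:
--             # Clock fills, level up
--             remaining_ticks -= segments
--             current_ll += 1
--         else:
--             # Partial fill
--             return (current_ll, remaining_ticks)
--
--     if current_ll >= 12:
--         # At max level, cap progress to segment count
--         segments = get_ll_clock_segments(12)
--         return (12, min(remaining_ticks, segments))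
--
--     return (current_ll, 0)
-- ===== SOURCE B (Python) =====
-- def compute_ll_from_ticks(total_ticks: int, starting_ll: int = 0) -> tuple[int, int]:
--     """Block-based closed-form progression: advance whole constant-cost blocks
--     of levels by integer division instead of ticking one segment-fill at a time."""
--     if starting_ll >= 12:
--         return (12, min(total_ticks, 5))
--     if total_ticks <= 0:
--         return (starting_ll, 0)
--     ll, rem = starting_ll, total_ticks
--     for bound, cost in ((6, 3), (10, 4), (12, 5)):
--         if ll < bound:
--             levels = min(rem // cost, bound - ll)
--             ll += levels
--             rem -= cost * levels
--             if ll < bound: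
--                 return (ll, rem)
--     return (12, min(rem, 5))
-- ===== Notes on version B (the rewrite author's own statement) =====
-- stated objective: faster
-- what changed: Replaces the one-segment-at-a-time simulation loop with closed-form block arithmetic: for each of the three constant-cost level blocks (<6 cost 3, 6-9 cost 4, 10-11 cost 5) it advances min(rem // cost, levels left in block) levels at once, so the work is O(1) instead of proportional to the number of level-ups.
import Mathlib
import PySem

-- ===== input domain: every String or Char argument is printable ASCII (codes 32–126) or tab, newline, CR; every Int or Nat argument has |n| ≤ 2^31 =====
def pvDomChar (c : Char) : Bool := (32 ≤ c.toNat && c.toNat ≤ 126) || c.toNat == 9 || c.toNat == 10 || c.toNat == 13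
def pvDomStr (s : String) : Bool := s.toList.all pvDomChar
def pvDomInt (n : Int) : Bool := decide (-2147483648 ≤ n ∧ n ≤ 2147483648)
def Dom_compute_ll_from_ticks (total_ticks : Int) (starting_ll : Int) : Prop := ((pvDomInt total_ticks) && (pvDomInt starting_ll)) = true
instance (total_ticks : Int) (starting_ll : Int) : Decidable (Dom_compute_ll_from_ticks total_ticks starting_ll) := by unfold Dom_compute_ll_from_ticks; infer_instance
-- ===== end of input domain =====

-- B replaces A's one-segment-at-a-time while loop with block arithmetic:
-- whole-block level advances by integer division over the three constant-cost blocks.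

-- ===== PORT A =====

-- get_ll_clock_segments, transliterated
def llSeg (license_level : Int) : Int :=
  if 1 ≤ license_level ∧ license_level ≤ 5 then 3
  else if 6 ≤ license_level ∧ license_level ≤ 9 then 4
  else if 10 ≤ license_level ∧ license_level ≤ 12 then 5
  else 3

theorem llSeg_pos (l : Int) : 0 < llSeg l := by
  unfold llSeg; split_ifs <;> norm_num

-- A's while loop (the in-loop 'return' on partial fill returns directly;
-- the post-loop code is the non-recursive branch).
def llLoop (remaining_ticks : Int) (current_ll : Int) : Int × Int :=
  if remaining_ticks > 0 ∧ current_ll < 12 then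
    let segments := llSeg current_ll
    if remaining_ticks ≥ segments then
      llLoop (remaining_ticks - segments) (current_ll + 1)
    else
      (current_ll, remaining_ticks)
  else if current_ll ≥ 12 then
    (12, min remaining_ticks (llSeg 12))
  else
    (current_ll, 0)
termination_by remaining_ticks.toNat
decreasing_by
  have := llSeg_pos current_ll
  omega

def compute_ll_from_ticks (total_ticks : Int) (starting_ll : Int) : Int × Int :=
  llLoop total_ticks starting_ll

-- ===== PORT B =====

-- the for-loop over the three (bound, cost) blocks, with its early returns
def llAdvance : List (Int × Int) → Int → Int → Int × Int
  | [], _, rem => (12, min rem 5)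
  | (bound, cost) :: rest, ll, rem =>
      if ll < bound then
        let levels := min (PySem.Int.floordiv rem cost) (bound - ll)
        if ll + levels < bound then (ll + levels, rem - cost * levels)
        else llAdvance rest (ll + levels) (rem - cost * levels)
      else llAdvance rest ll rem

def compute_ll_from_ticks_alt (total_ticks : Int) (starting_ll : Int) : Int × Int :=
  if starting_ll ≥ 12 then (12, min total_ticks 5)
  else if total_ticks ≤ 0 then (starting_ll, 0)
  else llAdvance [(6, 3), (10, 4), (12, 5)] starting_ll total_ticks

-- ===== PRECONDITION & SPEC =====
def Spec_compute_ll_from_ticks (total_ticks : Int) (starting_ll : Int) (out : Int × Int) : Prop := out = compute_ll_from_ticks_alt total_ticks starting_ll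
instance (total_ticks : Int) (starting_ll : Int) (out : Int × Int) : Decidable (Spec_compute_ll_from_ticks total_ticks starting_ll out) := by unfold Spec_compute_ll_from_ticks; infer_instance

-- ===== CLAIM (what is proved, stated in full; the proofs are below) =====
def Claim_equal_compute_ll_from_ticks : Prop := ∀ (total_ticks : Int) (starting_ll : Int), Dom_compute_ll_from_ticks total_ticks starting_ll → Spec_compute_ll_from_ticks total_ticks starting_ll (compute_ll_from_ticks total_ticks starting_ll)

-- ===== LEMMAS AND PROOFS =====

-- llSeg is constant on each block
theorem llSeg_lt6 (l : Int) (h : l < 6) : llSeg l = 3 := by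
  unfold llSeg; split_ifs <;> omega

theorem llSeg_mid (l : Int) (h6 : 6 ≤ l) (h10 : l < 10) : llSeg l = 4 := by
  unfold llSeg; split_ifs <;> omega

theorem llSeg_hi (l : Int) (h10 : 10 ≤ l) (h12 : l < 12) : llSeg l = 5 := by
  unfold llSeg; split_ifs <;> omega

theorem llLoop_ge12 (rem ll : Int) (h : 12 ≤ ll) : llLoop rem ll = (12, min rem 5) := by
  rw [llLoop]
  have : ¬ (rem > 0 ∧ ll < 12) := by omega
  rw [if_neg this, if_pos h]
  norm_num [llSeg]

theorem llLoop_zero (ll : Int) (hll : ll < 12) : llLoop 0 ll = (ll, 0) := by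
  rw [llLoop]
  have h1 : ¬ ((0:Int) > 0 ∧ ll < 12) := by omega
  rw [if_neg h1, if_neg (by omega : ¬ ll ≥ 12)]

-- One constant-cost block of A's loop, collapsed into a single division step.
theorem llLoop_block (cost bound lo : Int) (hc : 0 < cost) (hb : bound ≤ 12)
    (hseg : ∀ l, lo ≤ l → l < bound → llSeg l = cost) :
    ∀ (n : Nat) (rem ll : Int), (bound - ll).toNat ≤ n → 0 < rem → lo ≤ ll → ll < bound →
      llLoop rem ll =
        if ll + min (rem / cost) (bound - ll) < bound then
          (ll + min (rem / cost) (bound - ll), rem - cost * min (rem / cost) (bound - ll))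
        else llLoop (rem - cost * min (rem / cost) (bound - ll)) bound := by
  intro n
  induction n with
  | zero => intro rem ll hn hrem hlo hll; omega
  | succ n ih =>
    intro rem ll hn hrem hlo hll
    have hs : llSeg ll = cost := hseg ll hlo hll
    have h12 : ll < 12 := lt_of_lt_of_le hll hb
    rw [llLoop, if_pos (⟨hrem, h12⟩ : rem > 0 ∧ ll < 12)]
    simp only [hs]
    by_cases hge : rem ≥ cost
    · rw [if_pos hge]
      have hq1 : 1 ≤ rem / cost := by
        rw [Int.le_ediv_iff_mul_le hc]; omega
      by_cases hlast : ll + 1 = bound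
      · -- last level of the block
        have hm : min (rem / cost) (bound - ll) = 1 := by omega
        rw [hm]
        rw [if_neg (by omega : ¬ ll + 1 < bound)]
        have : rem - cost * 1 = rem - cost := by ring
        rw [this, hlast]
      · have hlt : ll + 1 < bound := by omega
        by_cases hz : rem - cost = 0
        · -- ticks run out exactly at a level-up: loop exits with (ll+1, 0)
          have hq : rem / cost = 1 := by
            rw [show rem = cost by omega]; exact Int.ediv_self (by omega)
          rw [hz, llLoop_zero (ll+1) (by omega)]
          have hm : min (rem / cost) (bound - ll) = 1 := by omega
          rw [hm, if_pos (by omega : ll + 1 < bound)]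
          have h0 : rem - cost * 1 = 0 := by rw [mul_one]; omega
          rw [h0]
        · have hrem' : 0 < rem - cost := by omega
          have hrec := ih (rem - cost) (ll + 1) (by omega) hrem' (by omega) hlt
          rw [hrec]
          have hdiv : (rem - cost) / cost = rem / cost - 1 := by
            have h := Int.add_mul_ediv_right rem (-1) (by omega : cost ≠ 0)
            have : rem + (-1) * cost = rem - cost := by ring
            rw [this] at h
            omega
          have hmin : min ((rem - cost) / cost) (bound - (ll + 1)) =
              min (rem / cost) (bound - ll) - 1 := by
            rw [hdiv]; omega
          rw [hmin]
          have e1 : ll + 1 + (min (rem / cost) (bound - ll) - 1) =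
              ll + min (rem / cost) (bound - ll) := by ring
          have e2 : rem - cost - cost * (min (rem / cost) (bound - ll) - 1) =
              rem - cost * min (rem / cost) (bound - ll) := by ring
          rw [e1, e2]
    · -- partial fill: rem < cost
      rw [if_neg hge]
      have hq : rem / cost = 0 := Int.ediv_eq_zero_of_lt (by omega) (by omega)
      have hm : min (rem / cost) (bound - ll) = 0 := by omega
      rw [hm, if_pos (by omega : ll + 0 < bound)]
      norm_num

-- leftover ticks after a full block are nonnegative
theorem rem_block_nonneg (cost bound rem ll : Int) (hc : 0 < cost) (hrem : 0 ≤ rem) :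
    0 ≤ rem - cost * min (rem / cost) (bound - ll) := by
  have h1 : cost * (rem / cost) + rem % cost = rem := Int.mul_ediv_add_emod rem cost
  have h2 : 0 ≤ rem % cost := Int.emod_nonneg rem (by omega)
  have h3 : 0 ≤ rem / cost := Int.ediv_nonneg hrem (by omega)
  rcases le_total (rem / cost) (bound - ll) with h | h
  · rw [min_eq_left h]; omega
  · rw [min_eq_right h]
    have : cost * (bound - ll) ≤ cost * (rem / cost) :=
      mul_le_mul_of_nonneg_left h (by omega)
    omega

-- glue: one (bound, cost) block of B's list matches A's loop through that block,
-- given that they match from level `bound` onwards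
theorem block_glue (cost bound lo : Int) (rest : List (Int × Int))
    (hc : 0 < cost) (hb : bound ≤ 12)
    (hseg : ∀ l, lo ≤ l → l < bound → llSeg l = cost)
    (hcont : ∀ rem, 0 ≤ rem → llLoop rem bound = llAdvance rest bound rem) :
    ∀ rem ll, 0 ≤ rem → lo ≤ ll → ll < bound →
      llLoop rem ll = llAdvance ((bound, cost) :: rest) ll rem := by
  intro rem ll hrem hlo hll
  rw [llAdvance, if_pos hll]
  simp only [PySem.Int.floordiv_eq_ediv_of_pos hc]
  by_cases h0 : rem = 0
  · subst h0
    rw [llLoop_zero ll (by omega)]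
    have hq : (0:Int) / cost = 0 := Int.zero_ediv cost
    have hm : min ((0:Int) / cost) (bound - ll) = 0 := by omega
    rw [hm, if_pos (by omega : ll + 0 < bound)]
    norm_num
  · have hrem' : 0 < rem := by omega
    rw [llLoop_block cost bound lo hc hb hseg (bound - ll).toNat rem ll le_rfl hrem' hlo hll]
    by_cases hfin : ll + min (rem / cost) (bound - ll) < bound
    · rw [if_pos hfin, if_pos hfin]
    · rw [if_neg hfin, if_neg hfin]
      have hble : bound - ll ≤ min (rem / cost) (bound - ll) := by omega
      have hbeq : ll + min (rem / cost) (bound - ll) = bound := by omega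
      rw [hbeq]
      exact hcont _ (rem_block_nonneg cost bound rem ll hc (by omega))

theorem glue12 : ∀ rem : Int, 0 ≤ rem → llLoop rem 12 = llAdvance [] 12 rem := by
  intro rem _
  rw [llLoop_ge12 rem 12 le_rfl, llAdvance]

theorem glue10 : ∀ rem ll : Int, 0 ≤ rem → 10 ≤ ll → ll < 12 →
    llLoop rem ll = llAdvance [(12, 5)] ll rem :=
  block_glue 5 12 10 [] (by norm_num) le_rfl (fun l h1 h2 => llSeg_hi l h1 h2) glue12

theorem glue6 : ∀ rem ll : Int, 0 ≤ rem → 6 ≤ ll → ll < 10 →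
    llLoop rem ll = llAdvance [(10, 4), (12, 5)] ll rem :=
  block_glue 4 10 6 [(12, 5)] (by norm_num) (by norm_num)
    (fun l h1 h2 => llSeg_mid l h1 h2)
    (fun rem h => glue10 rem 10 h le_rfl (by norm_num))

theorem glue0 (lo : Int) : ∀ rem ll : Int, 0 ≤ rem → lo ≤ ll → ll < 6 →
    llLoop rem ll = llAdvance [(6, 3), (10, 4), (12, 5)] ll rem :=
  block_glue 3 6 lo [(10, 4), (12, 5)] (by norm_num) (by norm_num)
    (fun l _ h2 => llSeg_lt6 l h2)
    (fun rem h => glue6 rem 6 h le_rfl (by norm_num))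

-- ===== VERDICT (by name: the statement is the Claim_ definition above) =====
theorem compute_ll_from_ticks_spec : Claim_equal_compute_ll_from_ticks := by
  intro tt sl _
  unfold Spec_compute_ll_from_ticks compute_ll_from_ticks compute_ll_from_ticks_alt
  by_cases h12 : sl ≥ 12
  · rw [if_pos h12, llLoop_ge12 tt sl h12]
  · rw [if_neg h12]
    by_cases hle : tt ≤ 0
    · rw [if_pos hle, llLoop]
      rw [if_neg (by omega : ¬ (tt > 0 ∧ sl < 12)), if_neg h12]
    · rw [if_neg hle]
      have htt : (0:Int) ≤ tt := by omega
      by_cases h6 : sl < 6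
      · exact glue0 sl tt sl htt le_rfl h6
      · by_cases h10 : sl < 10
        · rw [glue6 tt sl htt (by omega) h10]
          conv_rhs => rw [llAdvance]
          rw [if_neg (by omega : ¬ sl < 6)]
        · rw [glue10 tt sl htt (by omega) (by omega)]
          conv_rhs => rw [llAdvance]
          rw [if_neg (by omega : ¬ sl < 6)]
          conv_rhs => rw [llAdvance]
          rw [if_neg (by omega : ¬ sl < 10)]
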